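-- pv_equiv track=rewrite | github.com/RafaelPBPinto/LECI | 3_ano/IA/Aula1&2/guiao-de-programacao-funcional-RafaelPBPinto-master/aula1.py | fusao_ordenada
-- ===== SOURCE A (Python) =====
-- def fusao_ordenada(lista1, lista2):
-- 	if lista1 == [] and lista2 == []:
-- 		return []
-- 	if lista1[0] <= lista2[0]:
-- 		return [lista1[0], lista2[0]] + fusao_ordenada(lista1[1:], lista2[1:])
-- 	else:
-- 		return [lista2[0], lista1[0]] + fusao_ordenada(lista1[1:], lista2[1:])
-- 	pass
-- ===== SOURCE B (Python) =====
-- def fusao_ordenada(lista1, lista2):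
--     resultado = []
--     i = 0
--     while not (i >= len(lista1) and i >= len(lista2)):
--         a = lista1[i]
--         b = lista2[i]
--         resultado.extend([a, b] if a <= b else [b, a])
--         i += 1
--     return resultado
-- ===== Notes on version B (the rewrite author's own statement) =====
-- stated objective: faster
-- what changed: Replaces the recursion with repeated list slicing (each call copies both tails) by a single index-driven while loop appending each sorted pair to an accumulator.
import Mathlib
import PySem

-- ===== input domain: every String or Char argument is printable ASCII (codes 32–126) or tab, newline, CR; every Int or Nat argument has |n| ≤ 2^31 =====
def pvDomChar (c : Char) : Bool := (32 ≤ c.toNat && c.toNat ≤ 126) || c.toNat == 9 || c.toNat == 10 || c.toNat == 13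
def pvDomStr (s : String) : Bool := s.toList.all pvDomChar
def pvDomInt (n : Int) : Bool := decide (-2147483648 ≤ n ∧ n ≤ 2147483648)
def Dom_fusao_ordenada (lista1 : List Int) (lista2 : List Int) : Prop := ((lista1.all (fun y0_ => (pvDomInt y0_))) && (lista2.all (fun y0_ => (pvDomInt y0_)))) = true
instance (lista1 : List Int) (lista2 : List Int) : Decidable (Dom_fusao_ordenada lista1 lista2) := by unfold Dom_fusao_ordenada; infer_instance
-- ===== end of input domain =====

-- B replaces A's slicing recursion by an index-driven while loop with an accumulator (alternative decomposition, same values).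


-- ===== PORT A =====
-- Literal port of A's recursion; the `_, _` case is where Python raises IndexError
-- (one list empty, the other not) — excluded by Pre_.
def fusao_ordenada (lista1 : List Int) (lista2 : List Int) : List Int :=
  match lista1, lista2 with
  | [], [] => []
  | a :: t1, b :: t2 =>
      if a ≤ b then a :: b :: fusao_ordenada t1 t2
      else b :: a :: fusao_ordenada t1 t2
  | _, _ => []

-- ===== PORT B =====
-- The loop body; fuel bounds the iterations (inside Pre_ the loop runs exactly
-- lista1.length times, which the fuel covers). `getD i 0` is exact here: under
-- Pre_ the index is always in range (out of range is Python's IndexError, excluded).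
def fusaoAltGo (l1 l2 : List Int) (fuel : Nat) (i : Nat) (acc : List Int) : List Int :=
  match fuel with
  | 0 => acc
  | fuel + 1 =>
      if l1.length ≤ i ∧ l2.length ≤ i then acc
      else
        let a := l1.getD i 0
        let b := l2.getD i 0
        fusaoAltGo l1 l2 fuel (i + 1) (acc ++ (if a ≤ b then [a, b] else [b, a]))

def fusao_ordenada_alt (lista1 : List Int) (lista2 : List Int) : List Int :=
  fusaoAltGo lista1 lista2 (max lista1.length lista2.length) 0 []

-- ===== PRECONDITION & SPEC =====
-- Pre_ excludes unequal-length lists, on which Python A raises IndexError.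
def Pre_fusao_ordenada (lista1 : List Int) (lista2 : List Int) : Prop :=
  lista1.length = lista2.length
instance (lista1 : List Int) (lista2 : List Int) : Decidable (Pre_fusao_ordenada lista1 lista2) := by unfold Pre_fusao_ordenada; infer_instance
def pvWitness_fusao_ordenada : List Int × List Int := ([3, 1, 2], [2, 5, 2])

def Spec_fusao_ordenada (lista1 : List Int) (lista2 : List Int) (out : List Int) : Prop := out = fusao_ordenada_alt lista1 lista2
instance (lista1 : List Int) (lista2 : List Int) (out : List Int) : Decidable (Spec_fusao_ordenada lista1 lista2 out) := by unfold Spec_fusao_ordenada; infer_instance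

-- ===== CLAIM (what is proved, stated in full; the proofs are below) =====
def Claim_equal_fusao_ordenada : Prop := ∀ (lista1 : List Int) (lista2 : List Int), Dom_fusao_ordenada lista1 lista2 → Pre_fusao_ordenada lista1 lista2 → Spec_fusao_ordenada lista1 lista2 (fusao_ordenada lista1 lista2)

-- ===== LEMMAS AND PROOFS =====

theorem fusaoAltGo_eq (l1 l2 : List Int) (fuel i : Nat) (acc : List Int)
    (hlen : l1.length = l2.length) (hfuel : l1.length ≤ i + fuel) :
    fusaoAltGo l1 l2 fuel i acc = acc ++ fusao_ordenada (l1.drop i) (l2.drop i) := by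
  induction fuel generalizing i acc with
  | zero =>
      have h1 : l1.length ≤ i := by omega
      have h2 : l2.length ≤ i := by omega
      simp [fusaoAltGo, List.drop_eq_nil_of_le h1, List.drop_eq_nil_of_le h2, fusao_ordenada]
  | succ fuel ih =>
      by_cases hstop : l1.length ≤ i ∧ l2.length ≤ i
      · simp [fusaoAltGo, hstop, List.drop_eq_nil_of_le hstop.1, List.drop_eq_nil_of_le hstop.2,
          fusao_ordenada]
      · have hi1 : i < l1.length := by omega
        have hi2 : i < l2.length := by omega
        have hd1 : l1.drop i = l1[i] :: l1.drop (i + 1) := List.drop_eq_getElem_cons hi1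
        have hd2 : l2.drop i = l2[i] :: l2.drop (i + 1) := List.drop_eq_getElem_cons hi2
        have hg1 : l1.getD i 0 = l1[i] := List.getD_eq_getElem l1 0 hi1
        have hg2 : l2.getD i 0 = l2[i] := List.getD_eq_getElem l2 0 hi2
        rw [fusaoAltGo]
        simp only [hstop, if_false, hg1, hg2]
        rw [ih (i + 1) _ (by omega), hd1, hd2]
        by_cases hab : l1[i] ≤ l2[i] <;> simp [fusao_ordenada, hab]

-- ===== VERDICT (by name: the statement is the Claim_ definition above) =====
theorem fusao_ordenada_spec : Claim_equal_fusao_ordenada := by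
  intro l1 l2 _ hpre
  unfold Spec_fusao_ordenada fusao_ordenada_alt
  rw [fusaoAltGo_eq l1 l2 _ 0 [] hpre (by omega)]
  simp
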